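-- pv_equiv track=rewrite | github.com/005019218299/serp_quantum_v1 | ai_models/competitor_analyzer.py | _detect_strategy_shifts
-- ===== SOURCE A (Python) =====
-- from typing import List, Dict
--
-- def _detect_strategy_shifts(content_data: List[Dict]) -> List[str]:
--     """Detect real strategy shifts from content URLs"""
--     shifts = []
--     urls = [item.get('url', '') for item in content_data]
--
--     # Analyze URL patterns for strategy detection
--     if any('video' in url.lower() for url in urls):
--         shifts.append('video_content_focus')
--     if any('guide' in url.lower() or 'tutorial' in url.lower() for url in urls):
--         shifts.append('educational_content')
--     if any('review' in url.lower() for url in urls):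
--         shifts.append('review_content')
--     if any('blog' in url.lower() for url in urls):
--         shifts.append('blog_expansion')
--
--     return shifts
-- ===== SOURCE B (Python) =====
-- def _detect_strategy_shifts(content_data):
--     """Detect real strategy shifts from content URLs (single pass over items)."""
--     has_video = has_edu = has_review = has_blog = False
--     for item in content_data:
--         url = item.get('url', '').lower()
--         has_video = has_video or 'video' in url
--         has_edu = has_edu or 'guide' in url or 'tutorial' in url
--         has_review = has_review or 'review' in url
--         has_blog = has_blog or 'blog' in url
--     shifts = []
--     if has_video:
--         shifts.append('video_content_focus')
--     if has_edu:
--         shifts.append('educational_content')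
--     if has_review:
--         shifts.append('review_content')
--     if has_blog:
--         shifts.append('blog_expansion')
--     return shifts
-- ===== Notes on version B (the rewrite author's own statement) =====
-- stated objective: alternative
-- what changed: Replaces four independent any() scans over a prebuilt urls list with a single pass that lowercases each url once and maintains four boolean flags, then emits the tags from the flags in the fixed order.
import Mathlib
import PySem

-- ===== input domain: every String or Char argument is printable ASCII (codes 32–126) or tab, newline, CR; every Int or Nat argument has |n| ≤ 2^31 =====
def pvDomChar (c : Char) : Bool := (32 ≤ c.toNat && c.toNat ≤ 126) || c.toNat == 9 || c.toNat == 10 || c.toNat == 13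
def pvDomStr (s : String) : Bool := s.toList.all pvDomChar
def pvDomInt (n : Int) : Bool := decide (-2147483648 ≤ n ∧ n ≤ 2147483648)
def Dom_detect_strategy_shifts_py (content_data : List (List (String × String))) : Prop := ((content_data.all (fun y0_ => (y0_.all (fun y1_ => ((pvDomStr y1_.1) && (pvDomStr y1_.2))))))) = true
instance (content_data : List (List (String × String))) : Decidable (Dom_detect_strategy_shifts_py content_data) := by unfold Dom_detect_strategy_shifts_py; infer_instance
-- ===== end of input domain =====

-- ===== PORT A =====
-- B lowercases each url once and keeps four flags in a single pass; A rebuilds urls and runs four independent any() scans (objective: alternative decomposition).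
def detect_strategy_shifts_py (content_data : List (List (String × String))) : List String :=
  let urls := content_data.map (fun item => PySem.Dict.getD (PySem.Dict.mk item) "url" "")
  let shifts : List String := []
  let shifts := if urls.any (fun url => PySem.Str.isIn "video" (PySem.Str.lower url)) then shifts ++ ["video_content_focus"] else shifts
  let shifts := if urls.any (fun url => PySem.Str.isIn "guide" (PySem.Str.lower url) || PySem.Str.isIn "tutorial" (PySem.Str.lower url)) then shifts ++ ["educational_content"] else shifts
  let shifts := if urls.any (fun url => PySem.Str.isIn "review" (PySem.Str.lower url)) then shifts ++ ["review_content"] else shifts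
  let shifts := if urls.any (fun url => PySem.Str.isIn "blog" (PySem.Str.lower url)) then shifts ++ ["blog_expansion"] else shifts
  shifts

-- ===== PORT B =====
def detect_strategy_shifts_py_alt (content_data : List (List (String × String))) : List String :=
  let flags := content_data.foldl
    (fun (f : Bool × Bool × Bool × Bool) item =>
      let url := PySem.Str.lower (PySem.Dict.getD (PySem.Dict.mk item) "url" "")
      (f.1 || PySem.Str.isIn "video" url,
       f.2.1 || PySem.Str.isIn "guide" url || PySem.Str.isIn "tutorial" url,
       f.2.2.1 || PySem.Str.isIn "review" url,
       f.2.2.2 || PySem.Str.isIn "blog" url))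
    (false, false, false, false)
  (if flags.1 then ["video_content_focus"] else []) ++
  (if flags.2.1 then ["educational_content"] else []) ++
  (if flags.2.2.1 then ["review_content"] else []) ++
  (if flags.2.2.2 then ["blog_expansion"] else [])

-- ===== PRECONDITION & SPEC =====
def Spec_detect_strategy_shifts_py (content_data : List (List (String × String))) (out : List String) : Prop := out = detect_strategy_shifts_py_alt content_data
instance (content_data : List (List (String × String))) (out : List String) : Decidable (Spec_detect_strategy_shifts_py content_data out) := by unfold Spec_detect_strategy_shifts_py; infer_instance

-- ===== CLAIM (what is proved, stated in full; the proofs are below) =====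
def Claim_equal_detect_strategy_shifts_py : Prop := ∀ (content_data : List (List (String × String))), Dom_detect_strategy_shifts_py content_data → Spec_detect_strategy_shifts_py content_data (detect_strategy_shifts_py content_data)

-- ===== LEMMAS AND PROOFS =====
lemma pvFoldSpec (l : List (List (String × String))) (a b c d : Bool) :
    l.foldl
      (fun (f : Bool × Bool × Bool × Bool) item =>
        let url := PySem.Str.lower (PySem.Dict.getD (PySem.Dict.mk item) "url" "")
        (f.1 || PySem.Str.isIn "video" url,
         f.2.1 || PySem.Str.isIn "guide" url || PySem.Str.isIn "tutorial" url,
         f.2.2.1 || PySem.Str.isIn "review" url,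
         f.2.2.2 || PySem.Str.isIn "blog" url)) (a, b, c, d)
    = (a || l.any (fun item => PySem.Str.isIn "video" (PySem.Str.lower (PySem.Dict.getD (PySem.Dict.mk item) "url" ""))),
       b || l.any (fun item => PySem.Str.isIn "guide" (PySem.Str.lower (PySem.Dict.getD (PySem.Dict.mk item) "url" "")) || PySem.Str.isIn "tutorial" (PySem.Str.lower (PySem.Dict.getD (PySem.Dict.mk item) "url" ""))),
       c || l.any (fun item => PySem.Str.isIn "review" (PySem.Str.lower (PySem.Dict.getD (PySem.Dict.mk item) "url" ""))),
       d || l.any (fun item => PySem.Str.isIn "blog" (PySem.Str.lower (PySem.Dict.getD (PySem.Dict.mk item) "url" "")))) := by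
  induction l generalizing a b c d with
  | nil => simp
  | cons x xs ih =>
    rw [List.foldl_cons]
    refine (ih _ _ _ _).trans ?_
    simp [Bool.or_assoc]

-- ===== VERDICT =====
theorem detect_strategy_shifts_py_spec : Claim_equal_detect_strategy_shifts_py := by
  intro content_data _
  unfold Spec_detect_strategy_shifts_py detect_strategy_shifts_py detect_strategy_shifts_py_alt
  simp only [pvFoldSpec, List.any_map, Function.comp_def, Bool.false_or]
  split_ifs <;> rfl
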